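-- pv_equiv track=rewrite | github.com/Desipeli/adventofcode2023 | day3_2.py | get_leftmost_number_x
-- ===== SOURCE A (Python) =====
-- digits = "0123456789"
--
-- def get_leftmost_number_x(start_x, y, engine):
--     x = start_x
--     while True:
--         if x - 1 < 0:
--             break
--         if engine[y][x-1] not in digits:
--             break
--         x -= 1
--     return x
-- ===== SOURCE B (Python) =====
-- digits = "0123456789"
--
-- def get_leftmost_number_x(start_x, y, engine):
--     # single forward pass over the prefix: remember the position just after
--     # the last non-digit cell; the run of digit cells left of start_x begins there
--     if start_x <= 0:
--         return start_x
--     left = 0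
--     for i, cell in enumerate(engine[y][:start_x]):
--         if cell not in digits:
--             left = i + 1
--     return left
-- ===== Notes on version B (the rewrite author's own statement) =====
-- stated objective: simpler
-- what changed: Replaces the leftward one-step-at-a-time while-loop with a single forward pass over the prefix engine[y][:start_x] that records the position just after the last non-digit cell.
import Mathlib
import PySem

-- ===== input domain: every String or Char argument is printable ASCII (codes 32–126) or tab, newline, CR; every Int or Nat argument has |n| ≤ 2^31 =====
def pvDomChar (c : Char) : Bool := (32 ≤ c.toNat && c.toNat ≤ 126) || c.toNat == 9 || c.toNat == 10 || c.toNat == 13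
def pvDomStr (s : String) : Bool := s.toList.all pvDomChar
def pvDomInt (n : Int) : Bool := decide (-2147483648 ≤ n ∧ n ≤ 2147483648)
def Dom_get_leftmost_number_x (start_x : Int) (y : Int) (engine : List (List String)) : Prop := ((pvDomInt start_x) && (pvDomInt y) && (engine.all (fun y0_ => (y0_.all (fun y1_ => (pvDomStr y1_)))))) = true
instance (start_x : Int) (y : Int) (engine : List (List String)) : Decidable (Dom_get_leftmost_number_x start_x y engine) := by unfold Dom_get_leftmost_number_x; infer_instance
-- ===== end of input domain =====

-- B replaces A's one-at-a-time leftward while-loop by a single forward pass over the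
-- prefix engine[y][:start_x] that records the position just after the last non-digit
-- cell (objective: simpler; same exact return value on all inputs where A returns).

-- ===== PORT A =====
-- Python 'cell in digits' is a substring test on the string "0123456789"
def pvInDigits (cell : String) : Bool := PySem.Str.isIn cell "0123456789"

-- the 'while True' loop: x steps down by 1; fuel = start_x.toNat + 1 suffices since x
-- only decreases toward 0 and the loop stops at x = 0 at the latest
def pvALoop (row : List String) (x : Int) : Nat → Int
  | 0 => x
  | fuel + 1 =>
    if x - 1 < 0 then x
    else
      match PySem.List.pyGet? row (x - 1) with
      | none => x   -- Python raises IndexError here; excluded by Pre_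
      | some cell => if !(pvInDigits cell) then x else pvALoop row (x - 1) fuel

def get_leftmost_number_x (start_x : Int) (y : Int) (engine : List (List String)) : Int :=
  pvALoop ((PySem.List.pyGet? engine y).getD []) start_x (start_x.toNat + 1)

-- ===== PORT B =====
def get_leftmost_number_x_alt (start_x : Int) (y : Int) (engine : List (List String)) : Int :=
  if start_x ≤ 0 then start_x
  else
    (PySem.List.enumerate
        (PySem.List.slice ((PySem.List.pyGet? engine y).getD []) none (some start_x)) 0).foldl
      (fun left p => if !(pvInDigits p.2) then p.1 + 1 else left) 0

-- ===== PRECONDITION & SPEC =====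
-- Pre_ excludes exactly the inputs on which A raises IndexError: start_x ≥ 1 with row y
-- missing, or start_x beyond the end of row y (the first indexing engine[y][start_x-1] fails).
def Pre_get_leftmost_number_x (start_x : Int) (y : Int) (engine : List (List String)) : Prop :=
  start_x ≤ 0 ∨ (PySem.Raise.InRange engine.length y ∧
    start_x ≤ ((PySem.List.pyGet? engine y).getD []).length)
instance (start_x : Int) (y : Int) (engine : List (List String)) : Decidable (Pre_get_leftmost_number_x start_x y engine) := by unfold Pre_get_leftmost_number_x; infer_instance

def pvWitness_get_leftmost_number_x : Int × Int × List (List String) := (2, 0, [["1", "2", "a"]])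

def Spec_get_leftmost_number_x (start_x : Int) (y : Int) (engine : List (List String)) (out : Int) : Prop := out = get_leftmost_number_x_alt start_x y engine
instance (start_x : Int) (y : Int) (engine : List (List String)) (out : Int) : Decidable (Spec_get_leftmost_number_x start_x y engine out) := by unfold Spec_get_leftmost_number_x; infer_instance

-- ===== CLAIM (what is proved, stated in full; the proofs are below) =====
def Claim_equal_get_leftmost_number_x : Prop := ∀ (start_x : Int) (y : Int) (engine : List (List String)), Dom_get_leftmost_number_x start_x y engine → Pre_get_leftmost_number_x start_x y engine → Spec_get_leftmost_number_x start_x y engine (get_leftmost_number_x start_x y engine)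

-- ===== LEMMAS AND PROOFS =====

-- B's forward pass, as a function of the prefix list
def pvBScan (l : List String) : Int :=
  (PySem.List.enumerate l 0).foldl (fun left p => if !(pvInDigits p.2) then p.1 + 1 else left) 0

theorem pvBScan_append (l : List String) (a : String) :
    pvBScan (l ++ [a]) = if !(pvInDigits a) then (l.length : Int) + 1 else pvBScan l := by
  simp [pvBScan, PySem.List.enumerate_append, PySem.List.enumerate_cons, List.foldl_append]

theorem pvALoop_eq_scan (row : List String) :
    ∀ n : Nat, n ≤ row.length → pvALoop row (n : Int) (n + 1) = pvBScan (row.take n) := by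
  intro n
  induction n with
  | zero => intro _; simp [pvALoop, pvBScan, PySem.List.enumerate_nil]
  | succ m ih =>
    intro h
    have hm : m < row.length := by omega
    have htake : row.take (m + 1) = row.take m ++ [row[m]] := by
      rw [List.take_add_one, List.getElem?_eq_getElem hm]; rfl
    have hx : ((m : Int) + 1) - 1 = (m : Int) := by ring
    show pvALoop row ((m : Int) + 1) (m + 1 + 1) = _
    have hlt : (List.take m row).length = m := by
      rw [List.length_take]; omega
    rw [pvALoop, if_neg (by omega), hx, PySem.List.pyGet?_natCast,
        List.getElem?_eq_getElem hm, htake, pvBScan_append, hlt]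
    cases hd : pvInDigits row[m] with
    | true => simp only [hd, Bool.not_true, if_neg (by simp : ¬((false : Bool) = true))]; exact ih (by omega)
    | false => simp [hd]

-- ===== VERDICT (by name: the statement is the Claim_ definition above) =====
theorem get_leftmost_number_x_spec : Claim_equal_get_leftmost_number_x := by
  intro start_x y engine _ hpre
  unfold Spec_get_leftmost_number_x get_leftmost_number_x get_leftmost_number_x_alt
  by_cases hle : start_x ≤ 0
  · -- the loop breaks immediately (x - 1 < 0) and B returns start_x directly
    rw [if_pos hle]
    have : start_x.toNat + 1 = 0 + 1 := by omega
    rw [this, pvALoop, if_pos (by omega)]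
  · rw [if_neg hle]
    rcases hpre with h | ⟨_, hlen⟩
    · omega
    · set row := (PySem.List.pyGet? engine y).getD [] with hrow
      have hsx : start_x = ((start_x.toNat : Int)) := by omega
      have hn : start_x.toNat ≤ row.length := by omega
      rw [hsx, PySem.List.slice_to_natCast]
      have h2 : ((start_x.toNat : Int)).toNat = start_x.toNat := Int.toNat_natCast _
      rw [h2]
      simpa [pvBScan] using pvALoop_eq_scan row start_x.toNat hn
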